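-- pv_equiv track=rewrite | github.com/Jevi-Waugh/DRC | droid.py | calculate_wac
-- ===== SOURCE A (Python) =====
-- def calculate_wac(centers : list[tuple, tuple, tuple, tuple], weights : list) -> tuple[int, int]:
--     # calculate weighted average center
--     if centers and weights:
--         sum_weighted_x = sum(l[0]* w for l, w in zip(centers, weights))
--         sum_weighted_y = sum(l[1]* w for l, w in zip(centers, weights))
--         avg_x = sum_weighted_x//sum(weights)
--         avg_y = sum_weighted_y//sum(weights)
--         return (avg_x, avg_y)
--     return None, None
-- ===== SOURCE B (Python) =====
-- def _dc_pairs(pairs):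
--     # divide-and-conquer pairwise summation of weighted coordinates (exact for ints)
--     n = len(pairs)
--     if n == 0:
--         return (0, 0)
--     if n == 1:
--         (x, y), w = pairs[0]
--         return (x * w, y * w)
--     m = n // 2
--     ax, ay = _dc_pairs(pairs[:m])
--     bx, by = _dc_pairs(pairs[m:])
--     return (ax + bx, ay + by)
--
-- def _dc_weights(ws):
--     n = len(ws)
--     if n == 0:
--         return 0
--     if n == 1:
--         return ws[0]
--     m = n // 2
--     return _dc_weights(ws[:m]) + _dc_weights(ws[m:])
--
-- def calculate_wac(centers : list[tuple, tuple, tuple, tuple], weights : list) -> tuple[int, int]: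
--     # calculate weighted average center via divide-and-conquer pairwise summation
--     if centers and weights:
--         sx, sy = _dc_pairs(list(zip(centers, weights)))
--         tw = _dc_weights(weights)
--         return (sx // tw, sy // tw)
--     return None, None
-- ===== Notes on version B (the rewrite author's own statement) =====
-- stated objective: alternative
-- what changed: Replaced A's linear generator-expression scans with recursive divide-and-conquer (pairwise) summation: the zipped list and the weight list are split in half and the halves' partial sums are combined in a balanced tree, exact because integer addition is associative.
import Mathlib
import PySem

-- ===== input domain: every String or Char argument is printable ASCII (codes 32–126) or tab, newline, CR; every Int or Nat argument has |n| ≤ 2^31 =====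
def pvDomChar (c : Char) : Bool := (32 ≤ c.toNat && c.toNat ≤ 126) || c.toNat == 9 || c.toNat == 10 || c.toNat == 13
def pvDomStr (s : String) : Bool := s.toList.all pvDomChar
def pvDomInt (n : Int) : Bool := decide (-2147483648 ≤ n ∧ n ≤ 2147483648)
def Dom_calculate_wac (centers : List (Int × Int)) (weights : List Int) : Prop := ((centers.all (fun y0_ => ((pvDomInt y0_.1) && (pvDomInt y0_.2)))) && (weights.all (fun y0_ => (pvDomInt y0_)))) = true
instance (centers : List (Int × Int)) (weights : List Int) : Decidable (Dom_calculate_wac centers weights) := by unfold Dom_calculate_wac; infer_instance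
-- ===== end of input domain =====

-- B replaces A's linear generator-expression sums by recursive divide-and-conquer
-- (pairwise) summation over halves of the zipped list (alternative algorithm, exact
-- since integer addition is associative); return value only, no mutation.

-- ===== PORT A =====
-- sum(l[0]*w for l, w in zip(centers, weights)) — a map-then-sum over the zipped list
def calculate_wac (centers : List (Int × Int)) (weights : List Int) : Option Int × Option Int :=
  if centers ≠ [] ∧ weights ≠ [] then
    let sum_weighted_x := ((centers.zip weights).map (fun p => p.1.1 * p.2)).sum
    let sum_weighted_y := ((centers.zip weights).map (fun p => p.1.2 * p.2)).sum
    let avg_x := PySem.Int.floordiv sum_weighted_x weights.sum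
    let avg_y := PySem.Int.floordiv sum_weighted_y weights.sum
    (some avg_x, some avg_y)
  else (none, none)

-- ===== PORT B =====
-- _dc_pairs: split in half, sum halves recursively, combine
def dcPairs (l : List ((Int × Int) × Int)) : Int × Int :=
  if l.length = 0 then (0, 0)
  else if h1 : l.length = 1 then
    match l with
    | ((x, y), w) :: _ => (x * w, y * w)
    | [] => (0, 0)  -- unreachable under h1
  else
    let m := l.length / 2
    let a := dcPairs (l.take m)
    let b := dcPairs (l.drop m)
    (a.1 + b.1, a.2 + b.2)
termination_by l.length
decreasing_by
  · simp [List.length_take]; omega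
  · simp [List.length_drop]; omega

-- _dc_weights: same divide-and-conquer on the weight list
def dcWeights (l : List Int) : Int :=
  if l.length = 0 then 0
  else if h1 : l.length = 1 then
    match l with
    | w :: _ => w
    | [] => 0  -- unreachable under h1
  else
    let m := l.length / 2
    dcWeights (l.take m) + dcWeights (l.drop m)
termination_by l.length
decreasing_by
  · simp [List.length_take]; omega
  · simp [List.length_drop]; omega

def calculate_wac_alt (centers : List (Int × Int)) (weights : List Int) : Option Int × Option Int :=
  if centers ≠ [] ∧ weights ≠ [] then
    let s := dcPairs (centers.zip weights)
    let tw := dcWeights weights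
    (some (PySem.Int.floordiv s.1 tw), some (PySem.Int.floordiv s.2 tw))
  else (none, none)

-- ===== PRECONDITION & SPEC =====
-- Pre_ excludes only the inputs where Python A raises ZeroDivisionError: both lists
-- nonempty but sum(weights) == 0 (B raises there too).
def Pre_calculate_wac (centers : List (Int × Int)) (weights : List Int) : Prop :=
  centers = [] ∨ weights = [] ∨ weights.sum ≠ 0
instance (centers : List (Int × Int)) (weights : List Int) : Decidable (Pre_calculate_wac centers weights) := by unfold Pre_calculate_wac; infer_instance
def pvWitness_calculate_wac : (List (Int × Int)) × List Int := ([(2, 3), (4, 5)], [1, 2])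

def Spec_calculate_wac (centers : List (Int × Int)) (weights : List Int) (out : Option Int × Option Int) : Prop := out = calculate_wac_alt centers weights
instance (centers : List (Int × Int)) (weights : List Int) (out : Option Int × Option Int) : Decidable (Spec_calculate_wac centers weights out) := by unfold Spec_calculate_wac; infer_instance

-- ===== CLAIM (what is proved, stated in full; the proofs are below) =====
def Claim_equal_calculate_wac : Prop := ∀ (centers : List (Int × Int)) (weights : List Int), Dom_calculate_wac centers weights → Pre_calculate_wac centers weights → Spec_calculate_wac centers weights (calculate_wac centers weights)

-- ===== LEMMAS AND PROOFS =====
theorem dcWeights_eq (l : List Int) : dcWeights l = l.sum := by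
  induction l using dcWeights.induct with
  | case1 l h => rw [dcWeights]; simp_all [List.length_eq_zero_iff.mp h]
  | case2 w t h h1 =>
    have ht : t = [] := by cases t with | nil => rfl | cons a s => simp at h
    subst ht; rw [dcWeights]; simp
  | case3 a b c => simp at c
  | case4 l h h1 m iht ihd =>
    rw [dcWeights]
    simp only [if_neg h, dif_neg h1]
    rw [iht, ihd, ← List.sum_append, List.take_append_drop]

theorem dcPairs_eq (l : List ((Int × Int) × Int)) :
    dcPairs l = ((l.map (fun p => p.1.1 * p.2)).sum, (l.map (fun p => p.1.2 * p.2)).sum) := by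
  induction l using dcPairs.induct with
  | case1 l h => rw [dcPairs]; simp_all [List.length_eq_zero_iff.mp h]
  | case2 x y w t h h1 =>
    have ht : t = [] := by cases t with | nil => rfl | cons a s => simp at h
    subst ht; rw [dcPairs]; simp
  | case3 a b c => simp at c
  | case4 l h h1 m iht ihd =>
    rw [dcPairs]
    simp only [if_neg h, dif_neg h1]
    rw [iht, ihd]
    simp only [Prod.mk.injEq]
    constructor <;>
      rw [← List.sum_append, ← List.map_append, List.take_append_drop]

-- ===== VERDICT (by name: the statement is the Claim_ definition above) =====
theorem calculate_wac_spec : Claim_equal_calculate_wac := by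
  intro centers weights _ _
  unfold Spec_calculate_wac calculate_wac calculate_wac_alt
  split
  · simp [dcPairs_eq, dcWeights_eq]
  · rfl
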